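-- pv_equiv track=rewrite | github.com/OwlCowl/irdeto | ex2.py | solution
-- ===== SOURCE A (Python) =====
-- from itertools import groupby
--
-- def solution(S):
--     lst = []
--     loop = [list(g) for k, g in groupby(S)]
--     #return list for investigation
--     for data in loop:
--         lst.append("".join(data))
--     #find the longest element in list
--     maxEl = max(lst, key = len)
--     #compare with others element
--     #count the difference in length
--     #count the sum of missed elements
--     count = sum([(len(maxEl) - len(data)) for data in lst])
--     return count
-- ===== SOURCE B (Python) =====
-- def solution(S):
--     # Single pass over adjacent character pairs with three scalar counters
--     # (run count, longest run, current run); no run list, no joined strings,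
--     # no max() call; result is the closed form runs * longest - len(S).
--     runs = 1
--     best = 1
--     cur = 1
--     for a, b in zip(S, S[1:]):
--         if a == b:
--             cur += 1
--             if cur > best:
--                 best = cur
--         else:
--             runs += 1
--             cur = 1
--     return runs * best - len(S)
-- ===== Notes on version B (the rewrite author's own statement) =====
-- stated objective: simpler
-- what changed: B makes one pass over adjacent character pairs keeping three scalar counters (run count, longest run, current run) and returns the closed form runs*longest - len(S); it builds no run list and no joined run strings and calls no max(); Pre_ excludes only the empty string, on which A raises ValueError.
import Mathlib
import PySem

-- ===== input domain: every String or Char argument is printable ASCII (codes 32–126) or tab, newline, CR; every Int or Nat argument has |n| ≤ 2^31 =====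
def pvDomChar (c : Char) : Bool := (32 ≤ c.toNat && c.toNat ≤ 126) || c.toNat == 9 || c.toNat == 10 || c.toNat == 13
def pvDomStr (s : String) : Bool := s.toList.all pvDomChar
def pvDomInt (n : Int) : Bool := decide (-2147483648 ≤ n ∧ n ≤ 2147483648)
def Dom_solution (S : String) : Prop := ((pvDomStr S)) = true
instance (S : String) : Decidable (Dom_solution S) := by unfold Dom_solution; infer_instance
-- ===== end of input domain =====

-- B changes: one pass over adjacent character pairs with three scalar counters
-- (run count, longest run, current run) and the closed form runs*longest - len(S),
-- instead of groupby + joined run strings + max(key=len) + summed differences.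

-- ===== PORT A =====
-- itertools.groupby over a string: the maximal runs of equal characters, as lists of chars
def runsA : List Char → List (List Char)
  | [] => []
  | c :: cs =>
      (c :: cs.takeWhile (· == c)) :: runsA (cs.dropWhile (· == c))
  termination_by l => l.length
  decreasing_by
    simpa [Nat.lt_succ_iff] using List.length_dropWhile_le (· == c) cs

def solution (S : String) : Int :=
  -- lst = ["".join(data) for data in groupby(S)] (strings kept as List Char)
  let lst := runsA S.toList
  -- maxEl = max(lst, key=len); Python raises ValueError on empty S (excluded by Pre_)
  match PySem.List.max? lst (fun d => d.length) with
  | none => 0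
  | some maxEl => (lst.map (fun data => (maxEl.length : Int) - (data.length : Int))).sum

-- ===== PORT B =====
-- the loop body of Source B on state (runs, best, cur); counters are Nat (they never go negative)
def stepB (st : Nat × Nat × Nat) (p : Char × Char) : Nat × Nat × Nat :=
  if p.1 = p.2 then
    let cur' := st.2.2 + 1
    (st.1, if cur' > st.2.1 then cur' else st.2.1, cur')
  else (st.1 + 1, st.2.1, 1)

def solution_alt (S : String) : Int :=
  let l := S.toList
  -- for a, b in zip(S, S[1:]): …   (S[1:] of a string is its tail)
  let st := (l.zip l.tail).foldl stepB (1, 1, 1)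
  (st.1 : Int) * (st.2.1 : Int) - (l.length : Int)

-- ===== PRECONDITION & SPEC =====
-- Pre_ excludes only the empty string, on which A raises ValueError (max() of an empty sequence).
def Pre_solution (S : String) : Prop := S.toList ≠ []
instance (S : String) : Decidable (Pre_solution S) := by unfold Pre_solution; infer_instance
def pvWitness_solution : String := "aab"

def Spec_solution (S : String) (out : Int) : Prop := out = solution_alt S
instance (S : String) (out : Int) : Decidable (Spec_solution S out) := by unfold Spec_solution; infer_instance

-- ===== CLAIM (what is proved, stated in full; the proofs are below) =====
def Claim_equal_solution : Prop := ∀ (S : String), Dom_solution S → Pre_solution S → Spec_solution S (solution S)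

-- ===== LEMMAS AND PROOFS =====

-- takeWhile (· == c) returns only c's
lemma takeWhile_eq_replicate (c : Char) (cs : List Char) :
    cs.takeWhile (· == c) = List.replicate (cs.takeWhile (· == c)).length c := by
  rw [List.eq_replicate_iff]
  refine ⟨rfl, fun x hx => ?_⟩
  have := List.mem_takeWhile_imp hx
  simpa using this

-- adjacent pairs of a run of c's followed by d
lemma zip_run (c : Char) : ∀ (k : Nat) (d : List Char),
    (c :: (List.replicate k c ++ d)).zip (List.replicate k c ++ d)
      = List.replicate k (c, c) ++ (c :: d).zip d := by
  intro k
  induction k with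
  | zero => intro d; simp
  | succ k ih =>
      intro d
      simp only [List.replicate_succ, List.cons_append, List.zip_cons_cons]
      rw [ih d]

-- folding stepB over j equal pairs adds j to cur and updates best
lemma foldl_rep (c : Char) : ∀ (j runs best cur : Nat), cur ≤ best →
    List.foldl stepB (runs, best, cur) (List.replicate j (c, c))
      = (runs, Nat.max best (cur + j), cur + j) := by
  intro j
  induction j with
  | zero => intro runs best cur h; simp [Nat.max_eq_left h]
  | succ j ih =>
      intro runs best cur h
      rw [List.replicate_succ, List.foldl_cons]
      have hstep : stepB (runs, best, cur) (c, c)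
          = (runs, Nat.max best (cur + 1), cur + 1) := by
        simp only [stepB, if_true, Prod.mk.injEq, true_and, and_true]
        simp only [Nat.max_def]
        split_ifs <;> omega
      rw [hstep, ih runs (Nat.max best (cur + 1)) (cur + 1) (Nat.le_max_right _ _)]
      simp only [Prod.mk.injEq, true_and]
      refine ⟨?_, by omega⟩
      simp only [Nat.max_def]
      split_ifs <;> omega

-- head of dropWhile falsifies the predicate
lemma dropWhile_head_ne (c e : Char) (cs es : List Char)
    (h : cs.dropWhile (· == c) = e :: es) : ¬ (c = e) := by
  have := List.head?_dropWhile_not (· == c) cs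
  rw [h] at this
  simp at this
  exact fun hc => this hc.symm

-- sum of run lengths is the length of the list
lemma runsA_sum : ∀ (n : Nat) (l : List Char), l.length ≤ n →
    ((runsA l).map List.length).sum = l.length := by
  intro n
  induction n with
  | zero =>
      intro l hl
      have : l = [] := List.eq_nil_of_length_eq_zero (Nat.le_zero.mp hl)
      subst this; simp [runsA]
  | succ n ih =>
      intro l hl
      cases l with
      | nil => simp [runsA]
      | cons c cs =>
          rw [runsA]
          have hd : (cs.dropWhile (· == c)).length ≤ n := by
            have := List.length_dropWhile_le (· == c) cs
            simp at hl; omega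
          have hlen : (cs.takeWhile (· == c)).length + (cs.dropWhile (· == c)).length
              = cs.length := by
            rw [← List.length_append, List.takeWhile_append_dropWhile]
          simp only [List.map_cons, List.sum_cons, ih _ hd, List.length_cons]
          omega

-- foldl max reaches the maximum
lemma foldl_max_le : ∀ (t : List Nat) (b : Nat), (∀ x ∈ t, x ≤ b) →
    List.foldl Nat.max b t = b := by
  intro t
  induction t with
  | nil => intro b _; rfl
  | cons a t ih =>
      intro b h
      rw [List.foldl_cons]
      rw [show Nat.max b a = b from Nat.max_eq_left (h a (List.mem_cons_self ..))]
      exact ih b (fun x hx => h x (List.mem_cons_of_mem _ hx))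

lemma foldl_max_eq : ∀ (L : List Nat) (b m : Nat), b ≤ m → m ∈ L →
    (∀ x ∈ L, x ≤ m) → List.foldl Nat.max b L = m := by
  intro L
  induction L with
  | nil => intro b m _ hm; simp at hm
  | cons a t ih =>
      intro b m hb hm hle
      rw [List.foldl_cons]
      rcases List.mem_cons.mp hm with rfl | hm
      · rw [show Nat.max b m = m from Nat.max_eq_right hb]
        exact foldl_max_le t m (fun x hx => hle x (List.mem_cons_of_mem _ hx))
      · exact ih (Nat.max b a) m
          (Nat.max_le.mpr ⟨hb, hle a (List.mem_cons_self ..)⟩) hm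
          (fun x hx => hle x (List.mem_cons_of_mem _ hx))

-- MAIN loop invariant: folding stepB over the adjacent pairs of c::cs counts the
-- remaining runs, folds their lengths into best (the first run merged with cur), …
lemma mainB : ∀ (n : Nat) (c : Char) (cs : List Char), cs.length ≤ n →
    ∀ (runs best cur : Nat), 1 ≤ cur → cur ≤ best →
    ∃ z, List.foldl stepB (runs, best, cur) ((c :: cs).zip cs)
      = (runs + ((runsA (c :: cs)).map List.length).tail.length,
         List.foldl Nat.max best
           ((cur + (cs.takeWhile (· == c)).length)
              :: ((runsA (c :: cs)).map List.length).tail),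
         z) := by
  intro n
  induction n with
  | zero =>
      intro c cs hl runs best cur h1 hb
      have : cs = [] := List.eq_nil_of_length_eq_zero (Nat.le_zero.mp hl)
      subst this
      exact ⟨cur, by simp [runsA, Nat.max_eq_left hb]⟩
  | succ n ih =>
      intro c cs hl runs best cur h1 hb
      set t := cs.takeWhile (· == c) with ht
      set d := cs.dropWhile (· == c) with hd
      have hcs : cs = t ++ d := (List.takeWhile_append_dropWhile).symm
      have htr : t = List.replicate t.length c := takeWhile_eq_replicate c cs
      have hzip : (c :: cs).zip cs
          = List.replicate t.length (c, c) ++ (c :: d).zip d := by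
        conv_lhs => rw [hcs, htr]
        exact zip_run c t.length d
      have hruns : runsA (c :: cs) = (c :: t) :: runsA d := by rw [runsA]
      rw [hzip, List.foldl_append,
          foldl_rep c t.length runs best cur hb, hruns]
      cases hdc : d with
      | nil =>
          refine ⟨cur + t.length, ?_⟩
          simp [runsA]
      | cons e es =>
          have hne : ¬ (c = e) := dropWhile_head_ne c e cs es (by rw [← hd, hdc])
          rw [List.zip_cons_cons, List.foldl_cons]
          have hstep : stepB (runs, Nat.max best (cur + t.length), cur + t.length) (c, e)
              = (runs + 1, Nat.max best (cur + t.length), 1) := by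
            simp [stepB, hne]
          rw [hstep]
          have hes : es.length ≤ n := by
            have h1' : d.length ≤ cs.length := by rw [hd]; exact List.length_dropWhile_le _ _
            rw [hdc] at h1'; simp at h1'; omega
          obtain ⟨z, hz⟩ := ih e es hes (runs + 1) (Nat.max best (cur + t.length)) 1
            (le_refl 1) (le_trans (by omega) (Nat.le_max_right best (cur + t.length)))
          refine ⟨z, ?_⟩
          rw [hz]
          have hruns' : runsA (e :: es) = (e :: es.takeWhile (· == e)) :: runsA (es.dropWhile (· == e)) := by
            rw [runsA]
          refine Prod.ext ?_ (Prod.ext ?_ rfl)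
          · simp only [hruns', List.map_cons, List.tail_cons, List.length_cons]
            omega
          · simp only [hruns', List.map_cons, List.tail_cons, List.foldl_cons,
              List.length_cons]
            congr 2
            omega

lemma sum_sub_eq (m : Int) : ∀ (ls : List Nat),
    (ls.map (fun (l : Nat) => m - (l : Int))).sum = (ls.length : Int) * m - (ls.sum : Int) := by
  intro ls
  induction ls with
  | nil => simp
  | cons a t ih =>
      simp only [List.map_cons, List.sum_cons, List.length_cons]
      rw [ih]
      push_cast
      ring

-- ===== VERDICT (by name: the statement is the Claim_ definition above) =====
theorem solution_spec : Claim_equal_solution := by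
  intro S _ hpre
  unfold Spec_solution solution solution_alt
  dsimp only
  cases hS : S.toList with
  | nil => exact absurd hS hpre
  | cons c cs =>
      simp only [List.tail_cons]
      have hruns : runsA (c :: cs) = (c :: cs.takeWhile (· == c)) :: runsA (cs.dropWhile (· == c)) := by
        rw [runsA]
      set R : List Nat := (runsA (c :: cs)).map List.length with hR
      cases hA : PySem.List.max? (runsA (c :: cs)) (fun d => d.length) with
      | none =>
          rw [PySem.List.max?_eq_none_iff] at hA
          rw [hruns] at hA; exact absurd hA (by simp)
      | some maxEl =>
          have hmemA : maxEl ∈ runsA (c :: cs) := PySem.List.max?_mem hA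
          have hmR : maxEl.length ∈ R := by rw [hR]; exact List.mem_map_of_mem hmemA
          have hmax : ∀ x ∈ R, x ≤ maxEl.length := by
            intro x hx
            rw [hR] at hx
            obtain ⟨dd, hdd, rfl⟩ := List.mem_map.mp hx
            exact PySem.List.max?_isMax hA dd hdd
          have h1m : 1 ≤ maxEl.length := by
            have : (c :: cs.takeWhile (· == c)).length ≤ maxEl.length := by
              apply PySem.List.max?_isMax hA
              rw [hruns]; exact List.mem_cons_self ..
            simp at this; omega
          obtain ⟨z, hz⟩ := mainB cs.length c cs (le_refl _) 1 1 1 (le_refl 1) (le_refl 1)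
          rw [hz]
          have hRshape : R = (1 + (cs.takeWhile (· == c)).length)
              :: ((runsA (c :: cs)).map List.length).tail := by
            rw [hR, hruns]; simp; omega
          have hbest : List.foldl Nat.max 1
              ((1 + (cs.takeWhile (· == c)).length)
                 :: ((runsA (c :: cs)).map List.length).tail) = maxEl.length := by
            rw [← hRshape]
            exact foldl_max_eq R 1 maxEl.length h1m hmR hmax
          have hlen : 1 + ((runsA (c :: cs)).map List.length).tail.length = R.length := by
            rw [hRshape]
            simp only [List.length_cons]
            omega
          have hsum : R.sum = (c :: cs).length := by
            rw [hR]; exact runsA_sum (c :: cs).length (c :: cs) (le_refl _)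
          have hmap : (runsA (c :: cs)).map (fun data => (maxEl.length : Int) - (data.length : Int))
              = R.map (fun (l : Nat) => (maxEl.length : Int) - (l : Int)) := by
            rw [hR, List.map_map]; rfl
          dsimp only
          rw [hmap, sum_sub_eq, hbest, hlen, hsum]
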